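-- pv_equiv track=rewrite | github.com/joeycodingphase25/AlgorithmStudies | python/strings/kthUniqueString.py | kthString
-- ===== SOURCE A (Python) =====
-- def kthString(stringList, k):
--     uniques = set()
--     for string in stringList:
--         if string not in uniques:
--             uniques.add(string)
--         else:
--             uniques.remove(string)
--     for string in stringList:
--         if string in uniques:
--             k -= 1
--             if k == 0:
--                 return string
--     return ""
-- ===== SOURCE B (Python) =====
-- def kthString(stringList, k):
--     pos = {}
--     for i, s in enumerate(stringList):
--         pos.setdefault(s, []).append(i)
--     idxs = sorted(i for lst in pos.values() if len(lst) % 2 == 1 for i in lst)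
--     return stringList[idxs[k - 1]] if 1 <= k <= len(idxs) else ""
-- ===== Notes on version B (the rewrite author's own statement) =====
-- stated objective: alternative
-- what changed: Instead of A's parity-toggle set plus an early-return second scan of the list, B groups the positions of each string in one dict pass, flattens the index lists of odd-sized groups, sorts those indices, and answers by direct random access stringList[idxs[k-1]] (no second pass over the list).
import Mathlib
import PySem

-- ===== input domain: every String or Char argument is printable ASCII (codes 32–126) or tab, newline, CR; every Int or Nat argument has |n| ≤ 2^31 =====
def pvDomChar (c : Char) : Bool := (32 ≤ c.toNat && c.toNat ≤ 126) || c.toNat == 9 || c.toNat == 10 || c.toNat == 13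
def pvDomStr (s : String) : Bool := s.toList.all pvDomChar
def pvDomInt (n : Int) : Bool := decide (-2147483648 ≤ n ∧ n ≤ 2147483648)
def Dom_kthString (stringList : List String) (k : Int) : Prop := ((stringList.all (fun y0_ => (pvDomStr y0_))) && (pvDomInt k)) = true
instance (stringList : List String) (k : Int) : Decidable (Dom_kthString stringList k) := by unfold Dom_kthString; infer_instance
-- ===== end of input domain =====

-- B replaces A's parity-toggle set + early-return second scan by grouping the POSITIONS of each
-- string in a dict, flattening the index lists of odd-sized groups, sorting those indices and
-- answering by direct random access stringList[idxs[k-1]]; alternative (same task, different algorithm).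


-- ===== PORT A =====
-- first loop: 'if string not in uniques: uniques.add(string) else: uniques.remove(string)'.
-- In the else branch membership holds, so 'remove' never raises; Set.discard is exact there.
def kthToggle (u : PySem.Set String) (s : String) : PySem.Set String :=
  if s ∈ u then PySem.Set.discard u s else PySem.Set.add u s

-- second loop: 'for string in stringList: if string in uniques: k -= 1; if k == 0: return string'
def kthLoop (u : PySem.Set String) : List String → Int → String
  | [], _ => ""
  | s :: rest, k =>
    if s ∈ u then (if k - 1 = 0 then s else kthLoop u rest (k - 1))
    else kthLoop u rest k

def kthString (stringList : List String) (k : Int) : String :=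
  kthLoop (stringList.foldl kthToggle PySem.Set.empty) stringList k

-- ===== PORT B =====
-- pos: 'for i, s in enumerate(stringList): pos.setdefault(s, []).append(i)' — a grouping loop over
-- the enumerated pairs; 'pos.setdefault(s, []).append(i)' sets pos[s] = pos.get(s, []) + [i],
-- i.e. Dict.modify with default [].
-- idxs: 'sorted(i for lst in pos.values() if len(lst) % 2 == 1 for i in lst)'.
-- return: under the guard 1 <= k <= len(idxs) both subscripts are in range (idxs holds valid
-- positions of stringList), so the total pyGetD form is exact there; else branch is ''.
def kthString_alt (stringList : List String) (k : Int) : String :=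
  let pos : PySem.Dict String (List Int) :=
    (PySem.List.enumerate stringList 0).foldl
      (fun d p => d.modify p.2 [] (fun l => l ++ [p.1])) PySem.Dict.empty
  let idxs : List Int :=
    PySem.List.sorted ((pos.values.filter (fun l => l.length % 2 == 1)).flatten) (fun x => x) false
  if 1 ≤ k ∧ k ≤ (idxs.length : Int) then
    PySem.List.pyGetD stringList (PySem.List.pyGetD idxs (k - 1) 0) ""
  else ""

-- ===== PRECONDITION & SPEC =====
def Spec_kthString (stringList : List String) (k : Int) (out : String) : Prop := out = kthString_alt stringList k
instance (stringList : List String) (k : Int) (out : String) : Decidable (Spec_kthString stringList k out) := by unfold Spec_kthString; infer_instance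

-- ===== CLAIM (what is proved, stated in full; the proofs are below) =====
def Claim_equal_kthString : Prop := ∀ (stringList : List String) (k : Int), Dom_kthString stringList k → Spec_kthString stringList k (kthString stringList k)

-- ===== LEMMAS AND PROOFS =====

-- membership in the toggle fold = parity of the count, relative to initial membership
theorem mem_foldl_kthToggle (xs : List String) (u : PySem.Set String) (s : String) :
    (s ∈ xs.foldl kthToggle u) ↔ (if s ∈ u then xs.count s % 2 = 0 else xs.count s % 2 = 1) := by
  induction xs generalizing u with
  | nil => simp
  | cons a xs ih =>
    simp only [List.foldl_cons, ih, List.count_cons]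
    by_cases hsa : s = a
    · subst hsa
      by_cases hsu : s ∈ u
      · simp [kthToggle, hsu, PySem.Set.mem_discard]; omega
      · simp [kthToggle, hsu]; omega
    · have hne : (a == s) = false := beq_eq_false_iff_ne.mpr (Ne.symm hsa)
      rw [hne]
      simp only [Bool.false_eq_true, if_false, add_zero]
      by_cases hau : a ∈ u
      · simp [kthToggle, hau, PySem.Set.mem_discard, hsa]
      · simp [kthToggle, hau, hsa]

-- A's second loop, over any set u, is indexing into the sublist of elements of u
theorem kthLoop_eq (u : PySem.Set String) (xs : List String) (k : Int) :
    kthLoop u xs k =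
      (let f := xs.filter (fun s => decide (s ∈ u))
       if 1 ≤ k ∧ k ≤ (f.length : Int) then (PySem.List.pyGet? f (k - 1)).getD "" else "") := by
  induction xs generalizing k with
  | nil => simp [kthLoop]; intro h1 h2; omega
  | cons a xs ih =>
    simp only [kthLoop]
    by_cases ha : a ∈ u
    · simp only [ha, if_pos, List.filter_cons, decide_eq_true_eq]
      by_cases hk1 : k - 1 = 0
      · have hk : k = 1 := by omega
        subst hk
        simp [PySem.List.pyGet?, PySem.List.pyIdx?]
      · rw [if_neg hk1, ih (k - 1)]
        simp only [List.length_cons]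
        by_cases hk : 1 ≤ k - 1 ∧ k - 1 ≤ ((xs.filter (fun s => decide (s ∈ u))).length : Int)
        · rw [if_pos hk, if_pos (by push_cast; omega)]
          have h2 : k - 1 = ((k - 1).toNat : Int) := by omega
          rw [show k - 1 - 1 = ((k - 2).toNat : Int) by omega, h2,
            PySem.List.pyGet?_natCast, PySem.List.pyGet?_natCast]
          have : (k - 1).toNat = (k - 2).toNat + 1 := by omega
          rw [this]
          simp
        · rw [if_neg hk, if_neg (by push_cast; omega)]
    · simp only [ha, List.filter_cons, decide_eq_true_eq, ite_false]
      exact ih k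

-- picking elements of xs at the filtered index positions is filtering xs
theorem map_getD_filter_range (xs : List String) (p : String → Bool) :
    ((List.range xs.length).filter (fun j => p (xs.getD j ""))).map (fun j => xs.getD j "")
      = xs.filter p := by
  induction xs with
  | nil => simp
  | cons x xs ih =>
    rw [List.length_cons, List.range_succ_eq_map, List.filter_cons]
    have hgd0 : (x :: xs).getD 0 "" = x := rfl
    have hmap : List.filter (fun j => p ((x :: xs).getD j "")) (List.map Nat.succ (List.range xs.length))
        = List.map Nat.succ (List.filter (fun j => p (xs.getD j "")) (List.range xs.length)) := by
      rw [List.filter_map]; rfl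
    by_cases hx : p x = true
    · rw [hgd0, if_pos hx, List.map_cons, hmap, List.map_map, List.filter_cons_of_pos hx, ← ih]
      rfl
    · rw [hgd0, if_neg (by simp [hx]), hmap, List.map_map,
        List.filter_cons_of_neg (by simp [hx]), ← ih]
      rfl

-- B's enumerate-filter-map group of s is the list of occurrence indices of s
theorem enum_filter_map_eq (xs : List String) (s : String) (a : Int) :
    ((PySem.List.enumerate xs a).filter (fun p => p.2 == s)).map (·.1)
      = ((List.range xs.length).filter (fun j => xs.getD j "" == s)).map (fun (j : Nat) => a + (j : Int)) := by
  induction xs generalizing a with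
  | nil => simp [PySem.List.enumerate_nil]
  | cons x xs ih =>
    rw [PySem.List.enumerate_cons, List.length_cons, List.range_succ_eq_map,
      List.filter_cons, List.filter_cons]
    have hgd0 : (x :: xs).getD 0 "" = x := rfl
    have hmap : List.filter (fun j => (x :: xs).getD j "" == s) (List.map Nat.succ (List.range xs.length))
        = List.map Nat.succ (List.filter (fun j => xs.getD j "" == s) (List.range xs.length)) := by
      rw [List.filter_map]; rfl
    have htail : List.map (fun (j : Nat) => a + (j : Int))
          (List.map Nat.succ (List.filter (fun j => xs.getD j "" == s) (List.range xs.length)))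
        = List.map (fun (j : Nat) => (a + 1) + (j : Int))
          (List.filter (fun j => xs.getD j "" == s) (List.range xs.length)) := by
      rw [List.map_map]; apply List.map_congr_left; intro j _; simp; ring
    by_cases hx : (x == s) = true
    · rw [hgd0, if_pos hx, if_pos hx, List.map_cons, List.map_cons, hmap, htail, ih (a+1)]
      norm_num
    · rw [hgd0, if_neg (by simp_all), if_neg (by simp_all), hmap, htail, ih (a+1)]

-- B's grouping dict: lookup at s is the (Int-cast) list of occurrence indices of s
theorem posB_getD (xs : List String) (s : String) :
    ((PySem.List.enumerate xs 0).foldl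
        (fun d p => d.modify p.2 [] (fun l => l ++ [p.1])) PySem.Dict.empty).getD s []
      = ((List.range xs.length).filter (fun j => xs.getD j "" == s)).map (fun (j : Nat) => (j : Int)) := by
  have hswap : (PySem.List.enumerate xs 0).foldl
        (fun d p => d.modify p.2 [] (fun l => l ++ [p.1])) (PySem.Dict.empty : PySem.Dict String (List Int))
      = ((PySem.List.enumerate xs 0).map (fun p => (p.2, p.1))).foldl
        (fun d p => d.modify p.1 [] (fun l => l ++ [p.2])) PySem.Dict.empty := by
    rw [List.foldl_map]
  rw [hswap, PySem.Dict.getD_foldl_modify_append, PySem.Dict.getD_empty, List.nil_append,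
    List.filter_map, List.map_map]
  have : ((PySem.List.enumerate xs 0).filter ((fun p => p.1 == s) ∘ (fun p => (p.2, p.1)))).map
        ((fun p => p.2) ∘ (fun p => (p.2, p.1)))
      = ((PySem.List.enumerate xs 0).filter (fun p => p.2 == s)).map (·.1) := rfl
  rw [this, enum_filter_map_eq]
  simp

-- B's grouping dict: keys are the distinct strings, in first-occurrence order, without duplicates
theorem posB_keys (xs : List String) :
    ((PySem.List.enumerate xs 0).foldl
        (fun d p => d.modify p.2 [] (fun l => l ++ [p.1])) (PySem.Dict.empty : PySem.Dict String (List Int))).keys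
      = PySem.Set.ofList xs := by
  rw [PySem.Dict.keys_foldl_modify_key]
  simp [PySem.List.map_snd_enumerate, PySem.Set.update_nil_left]

theorem posB_nodup (xs : List String) :
    ((PySem.List.enumerate xs 0).foldl
        (fun d p => d.modify p.2 [] (fun l => l ++ [p.1])) (PySem.Dict.empty : PySem.Dict String (List Int))).keys.Nodup := by
  apply PySem.Dict.nodup_keys_foldl_modify_key
  simp

-- the flattened odd-sized groups of B's dict, before sorting
theorem idxsB_eq (xs : List String) :
    ((((PySem.List.enumerate xs 0).foldl
        (fun d p => d.modify p.2 [] (fun l => l ++ [p.1])) (PySem.Dict.empty : PySem.Dict String (List Int))).values.filter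
        (fun l => l.length % 2 == 1)).flatten)
      = ((((PySem.Set.ofList xs).filter (fun s => xs.count s % 2 == 1)).map
          (fun s => (List.range xs.length).filter (fun j => xs.getD j "" == s))).flatten).map
          (fun (j : Nat) => (j : Int)) := by
  set pos := (PySem.List.enumerate xs 0).foldl
      (fun d p => d.modify p.2 [] (fun l => l ++ [p.1])) (PySem.Dict.empty : PySem.Dict String (List Int)) with hpos
  have hPlen : ∀ s : String, ((List.range xs.length).filter (fun j => xs.getD j "" == s)).length = xs.count s := by
    intro s
    have h := congrArg List.length (map_getD_filter_range xs (fun x => x == s))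
    rw [List.length_map] at h
    rw [h, List.count_eq_length_filter]
  have hvals : pos.values = (PySem.Set.ofList xs).map
      (fun s => ((List.range xs.length).filter (fun j => xs.getD j "" == s)).map (fun (j : Nat) => (j : Int))) := by
    rw [PySem.Dict.values_eq_map_keys pos (posB_nodup xs) [], posB_keys]
    apply List.map_congr_left
    intro s _
    exact posB_getD xs s
  rw [hvals, List.filter_map]
  have hpred : (PySem.Set.ofList xs).filter
        ((fun l => l.length % 2 == 1) ∘ (fun s => ((List.range xs.length).filter (fun j => xs.getD j "" == s)).map (fun (j : Nat) => (j : Int))))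
      = (PySem.Set.ofList xs).filter (fun s => xs.count s % 2 == 1) := by
    apply List.filter_congr
    intro s _
    simp only [Function.comp_apply, List.length_map, hPlen s]
  rw [hpred, List.map_flatten, List.map_map]
  rfl

-- the flattened odd groups are a permutation of the in-order odd-occurrence indices
theorem permB (xs : List String) :
    ((List.range xs.length).filter (fun j => xs.count (xs.getD j "") % 2 == 1)).Perm
      ((((PySem.Set.ofList xs).filter (fun s => xs.count s % 2 == 1)).map
          (fun s => (List.range xs.length).filter (fun j => xs.getD j "" == s))).flatten) := by
  have h1 : ((List.range xs.length).filter (fun j => xs.count (xs.getD j "") % 2 == 1)).Nodup :=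
    List.nodup_range.filter _
  have h2 : ((((PySem.Set.ofList xs).filter (fun s => xs.count s % 2 == 1)).map
      (fun s => (List.range xs.length).filter (fun j => xs.getD j "" == s))).flatten).Nodup := by
    rw [List.nodup_flatten]
    constructor
    · intro l hl
      obtain ⟨s, _, rfl⟩ := List.mem_map.mp hl
      exact List.nodup_range.filter _
    · apply List.Pairwise.map
      · intro s t hst j hjs hjt
        simp only [List.mem_filter, List.mem_range, beq_iff_eq] at hjs hjt
        exact absurd (hjs.2 ▸ hjt.2) hst
      · exact (PySem.Set.nodup_ofList xs).filter _
  refine (List.perm_ext_iff_of_nodup h1 h2).mpr ?_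
  intro j
  simp only [List.mem_filter, List.mem_range, List.mem_flatten, List.mem_map, beq_iff_eq,
    PySem.Set.mem_ofList]
  constructor
  · rintro ⟨hj, hq⟩
    refine ⟨(List.range xs.length).filter (fun j' => xs.getD j' "" == xs.getD j ""), ⟨xs.getD j "", ⟨?_, hq⟩, rfl⟩, ?_⟩
    · rw [List.getD_eq_getElem xs "" hj]
      exact List.getElem_mem hj
    · simp [List.mem_filter, List.mem_range, hj]
  · rintro ⟨l, ⟨s, ⟨hs, hq⟩, rfl⟩, hj⟩
    simp only [List.mem_filter, List.mem_range, beq_iff_eq] at hj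
    exact ⟨hj.1, hj.2 ▸ hq⟩

-- sorting those indices names them in increasing order: exactly the in-order odd indices
theorem sortedB (xs : List String) :
    PySem.List.sorted
      (((((PySem.Set.ofList xs).filter (fun s => xs.count s % 2 == 1)).map
          (fun s => (List.range xs.length).filter (fun j => xs.getD j "" == s))).flatten).map
          (fun (j : Nat) => (j : Int)))
      (fun x => x) false
    = ((List.range xs.length).filter (fun j => xs.count (xs.getD j "") % 2 == 1)).map
        (fun (j : Nat) => (j : Int)) := by
  apply PySem.List.sorted_eq_of_perm_of_pairwise_lt
  · exact (permB xs).map _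
  · refine List.pairwise_map.mpr ?_
    exact (List.pairwise_lt_range.filter _).imp (fun h => by exact_mod_cast h)

-- ===== VERDICT (by name: the statement is the Claim_ definition above) =====
theorem kthString_spec : Claim_equal_kthString := by
  intro xs k _
  show kthString xs k = kthString_alt xs k
  -- A's side: indexing into the filtered list of odd-count occurrences
  have hA : kthString xs k
      = (if 1 ≤ k ∧ k ≤ ((xs.filter (fun s => xs.count s % 2 == 1)).length : Int)
         then (PySem.List.pyGet? (xs.filter (fun s => xs.count s % 2 == 1)) (k - 1)).getD "" else "") := by
    rw [kthString, kthLoop_eq]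
    have : xs.filter (fun s => decide (s ∈ xs.foldl kthToggle PySem.Set.empty))
        = xs.filter (fun s => xs.count s % 2 == 1) := by
      apply List.filter_congr
      intro s _
      have hm : s ∈ xs.foldl kthToggle PySem.Set.empty ↔ xs.count s % 2 = 1 := by
        rw [mem_foldl_kthToggle]; simp [PySem.Set.empty]
      by_cases hp : xs.count s % 2 = 1
      · rw [decide_eq_true (hm.mpr hp)]; simp [hp]
      · rw [decide_eq_false (fun h => hp (hm.mp h))]; simp [hp]
    rw [this]
  -- B's side: indexing xs at the sorted odd-occurrence indices
  have halt : kthString_alt xs k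
      = (let idxs := ((List.range xs.length).filter (fun j => xs.count (xs.getD j "") % 2 == 1)).map
            (fun (j : Nat) => (j : Int))
         if 1 ≤ k ∧ k ≤ (idxs.length : Int)
         then PySem.List.pyGetD xs (PySem.List.pyGetD idxs (k - 1) 0) "" else "") := by
    unfold kthString_alt
    simp only [idxsB_eq, sortedB]
  rw [hA, halt]
  have hFI : xs.filter (fun s => xs.count s % 2 == 1)
      = ((List.range xs.length).filter (fun j => xs.count (xs.getD j "") % 2 == 1)).map
          (fun j => xs.getD j "") :=
    (map_getD_filter_range xs (fun s => xs.count s % 2 == 1)).symm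
  have hlen : (xs.filter (fun s => xs.count s % 2 == 1)).length
      = ((List.range xs.length).filter (fun j => xs.count (xs.getD j "") % 2 == 1)).length := by
    rw [hFI, List.length_map]
  by_cases hg : 1 ≤ k ∧ k ≤ ((xs.filter (fun s => xs.count s % 2 == 1)).length : Int)
  · rw [if_pos hg, if_pos (by simp only [List.length_map]; omega)]
    set I := (List.range xs.length).filter (fun j => xs.count (xs.getD j "") % 2 == 1) with hI
    have hj : (k - 1).toNat < I.length := by omega
    have hjF : (k - 1).toNat < (xs.filter (fun s => xs.count s % 2 == 1)).length := by omega
    rw [show k - 1 = (((k - 1).toNat : Nat) : Int) by omega, PySem.List.pyGet?_natCast,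
      List.getElem?_eq_getElem hjF, Option.getD_some, PySem.List.pyGetD_natCast,
      List.getD_eq_getElem (I.map (fun (j : Nat) => (j : Int))) 0 (by simpa using hj),
      List.getElem_map, PySem.List.pyGetD_natCast]
    rw [List.getElem_of_eq hFI hjF, List.getElem_map]
  · rw [if_neg hg, if_neg (by simp only [List.length_map]; omega)]
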